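-- pv_equiv track=rewrite | github.com/pribanacek/cicadas | src/topology/GraphAssembler.py | is_mapping_compatible
-- ===== SOURCE A (Python) =====
-- def is_mapping_compatible(mapA, mapB, pathAIds, stringA, stringB):
--     # check if two pair-region subgraphs are safe to merge
--     listA = list(mapA)
--     listB = list(mapB)
--     start = pathAIds[0]
--     end = pathAIds[-1]
--     maps_adjacent = False
--     if listA[0] == start and listB[0] == start:
--         maps_adjacent = True
--     if listA[-1] == end and listB[-1] == end:
--         maps_adjacent = True
--
--     if not maps_adjacent:
--         return False
--
--     caiusA = set(mapA.keys())
--     caiusB = set(mapB.keys())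
--     if len(caiusA) == len(stringA) or len(caiusB) == len(stringB):
--         return False
--
--     for ka, va in mapA.items():
--         for kb, vb in mapB.items():
--             if va == vb and ka != kb:
--                 return False
--             elif ka == kb and va != vb:
--                 return False
--     return True
-- ===== SOURCE B (Python) =====
-- def is_mapping_compatible(mapA, mapB, pathAIds, stringA, stringB):
--     # check if two pair-region subgraphs are safe to merge (hash-index version)
--     keysA = list(mapA)
--     keysB = list(mapB)
--     start = pathAIds[0]
--     end = pathAIds[-1]
--     if not ((keysA[0] == start and keysB[0] == start)
--             or (keysA[-1] == end and keysB[-1] == end)):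
--         return False
--     if len(mapA) == len(stringA) or len(mapB) == len(stringB):
--         return False
--     # value -> first key in mapB, plus the set of values occurring twice in mapB
--     val_key_b = {}
--     dup_vals_b = set()
--     for k, v in mapB.items():
--         if v in val_key_b:
--             dup_vals_b.add(v)
--         else:
--             val_key_b[v] = k
--     for ka, va in mapA.items():
--         vb = mapB.get(ka)
--         if vb is not None and vb != va:
--             return False
--         if va in dup_vals_b:
--             return False
--         kb = val_key_b.get(va)
--         if kb is not None and kb != ka:
--             return False
--     return True
-- ===== Notes on version B (the rewrite author's own statement) =====
-- stated objective: alternative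
-- what changed: Replaced the nested loop over all (mapA item, mapB item) pairs by one pass over mapB building a value->first-key index plus a duplicated-values set, then one pass over mapA doing hash lookups; the two adjacency ifs with a flag collapse into one guard and the redundant set(keys) is dropped (dict keys are already distinct).
import Mathlib
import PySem

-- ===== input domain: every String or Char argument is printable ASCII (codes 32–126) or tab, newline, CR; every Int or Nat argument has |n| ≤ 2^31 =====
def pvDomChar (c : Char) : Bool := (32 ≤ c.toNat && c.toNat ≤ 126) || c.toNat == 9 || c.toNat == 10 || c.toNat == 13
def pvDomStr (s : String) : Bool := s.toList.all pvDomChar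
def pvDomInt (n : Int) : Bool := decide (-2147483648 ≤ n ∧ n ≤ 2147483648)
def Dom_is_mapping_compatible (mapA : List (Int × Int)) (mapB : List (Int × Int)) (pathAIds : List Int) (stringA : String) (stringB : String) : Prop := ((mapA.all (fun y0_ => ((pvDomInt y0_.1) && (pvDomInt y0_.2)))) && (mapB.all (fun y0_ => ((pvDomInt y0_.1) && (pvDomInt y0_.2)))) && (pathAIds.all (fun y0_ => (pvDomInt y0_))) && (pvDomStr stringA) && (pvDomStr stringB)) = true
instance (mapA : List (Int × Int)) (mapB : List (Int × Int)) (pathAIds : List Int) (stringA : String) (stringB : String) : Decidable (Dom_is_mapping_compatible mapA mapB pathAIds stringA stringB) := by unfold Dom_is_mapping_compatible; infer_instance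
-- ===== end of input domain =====

-- B replaces A's nested pair loop by a single pass over mapB building a value→first-key
-- index plus a duplicated-values set, then one pass over mapA (alternative algorithm;
-- same return value on every input admitted by Pre_).

-- ===== PORT A =====
def is_mapping_compatible (mapA : List (Int × Int)) (mapB : List (Int × Int)) (pathAIds : List Int) (stringA : String) (stringB : String) : Bool :=
  let listA := mapA.map Prod.fst
  let listB := mapB.map Prod.fst
  match PySem.List.pyGet? pathAIds 0, PySem.List.pyGet? pathAIds (-1),
        PySem.List.pyGet? listA 0, PySem.List.pyGet? listA (-1),
        PySem.List.pyGet? listB 0, PySem.List.pyGet? listB (-1) with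
  | some start, some stop, some a0, some aL, some b0, some bL =>
    let adj1 : Bool := a0 == start && b0 == start
    let maps_adjacent : Bool := if adj1 then true else false
    let maps_adjacent : Bool := if aL == stop && bL == stop then true else maps_adjacent
    if !maps_adjacent then false
    else
      let caiusA := PySem.Set.ofList listA
      let caiusB := PySem.Set.ofList listB
      if PySem.Set.len caiusA == PySem.Str.len stringA || PySem.Set.len caiusB == PySem.Str.len stringB then false
      else
        if mapA.any (fun pa => mapB.any (fun pb =>
             (pa.2 == pb.2 && pa.1 != pb.1) || (pa.1 == pb.1 && pa.2 != pb.2))) then false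
        else true
  | _, _, _, _, _, _ => false    -- IndexError (empty mapA/mapB/pathAIds); excluded by Pre_

-- ===== PORT B =====
-- one pass over mapB: (value → first key with that value, set of values seen twice)
def pvIndexB (mapB : List (Int × Int)) : PySem.Dict Int Int × PySem.Set Int :=
  mapB.foldl (fun p kv =>
    if p.1.contains kv.2 then (p.1, PySem.Set.add p.2 kv.2)
    else (p.1.insert kv.2 kv.1, p.2)) (PySem.Dict.empty, PySem.Set.empty)

def is_mapping_compatible_alt (mapA : List (Int × Int)) (mapB : List (Int × Int)) (pathAIds : List Int) (stringA : String) (stringB : String) : Bool :=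
  let keysA := mapA.map Prod.fst
  let keysB := mapB.map Prod.fst
  -- each .elim false is one of Source B's list index accesses (false only where Source B raises IndexError, outside Pre_)
  (PySem.List.pyGet? pathAIds 0).elim false fun start =>
  (PySem.List.pyGet? pathAIds (-1)).elim false fun stop =>
  (PySem.List.pyGet? keysA 0).elim false fun a0 =>
  (PySem.List.pyGet? keysA (-1)).elim false fun aL =>
  (PySem.List.pyGet? keysB 0).elim false fun b0 =>
  (PySem.List.pyGet? keysB (-1)).elim false fun bL =>
  if !((a0 == start && b0 == start) || (aL == stop && bL == stop)) then false
  else if (mapA.length : Int) == PySem.Str.len stringA || (mapB.length : Int) == PySem.Str.len stringB then false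
  else
    let dB := PySem.Dict.mk mapB
    let idx := pvIndexB mapB
    mapA.all (fun kv =>
      ((dB.get? kv.1).all (fun vb => vb == kv.2)) &&
      !(PySem.Set.contains idx.2 kv.2) &&
      ((idx.1.get? kv.2).all (fun kb => kb == kv.1)))

-- ===== PRECONDITION & SPEC =====
-- Pre_ excludes empty pathAIds / mapA / mapB, on which A raises IndexError, and assoc
-- lists with duplicate keys, which do not represent a Python dict (dicts have unique keys).
def Pre_is_mapping_compatible (mapA : List (Int × Int)) (mapB : List (Int × Int)) (pathAIds : List Int) (stringA : String) (stringB : String) : Prop :=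
  pathAIds ≠ [] ∧ mapA ≠ [] ∧ mapB ≠ [] ∧ (mapA.map Prod.fst).Nodup ∧ (mapB.map Prod.fst).Nodup
instance (mapA : List (Int × Int)) (mapB : List (Int × Int)) (pathAIds : List Int) (stringA : String) (stringB : String) : Decidable (Pre_is_mapping_compatible mapA mapB pathAIds stringA stringB) := by unfold Pre_is_mapping_compatible; infer_instance

def pvWitness_is_mapping_compatible : (List (Int × Int)) × (List (Int × Int)) × List Int × String × String :=
  ([(1, 5)], [(1, 6)], [1, 2], "ab", "cd")

def Spec_is_mapping_compatible (mapA : List (Int × Int)) (mapB : List (Int × Int)) (pathAIds : List Int) (stringA : String) (stringB : String) (out : Bool) : Prop := out = is_mapping_compatible_alt mapA mapB pathAIds stringA stringB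
instance (mapA : List (Int × Int)) (mapB : List (Int × Int)) (pathAIds : List Int) (stringA : String) (stringB : String) (out : Bool) : Decidable (Spec_is_mapping_compatible mapA mapB pathAIds stringA stringB out) := by unfold Spec_is_mapping_compatible; infer_instance

-- ===== CLAIM (what is proved, stated in full; the proofs are below) =====
def Claim_equal_is_mapping_compatible : Prop := ∀ (mapA : List (Int × Int)) (mapB : List (Int × Int)) (pathAIds : List Int) (stringA : String) (stringB : String), Dom_is_mapping_compatible mapA mapB pathAIds stringA stringB → Pre_is_mapping_compatible mapA mapB pathAIds stringA stringB → Spec_is_mapping_compatible mapA mapB pathAIds stringA stringB (is_mapping_compatible mapA mapB pathAIds stringA stringB)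

-- ===== LEMMAS AND PROOFS =====

-- characterisation of the fold's value→key component: first key in l with the value,
-- unless the accumulator already had one
theorem pvIndexB_fst_get? (l : List (Int × Int)) (d : PySem.Dict Int Int) (s : PySem.Set Int) (v : Int) :
    ((l.foldl (fun p kv =>
        if p.1.contains kv.2 then (p.1, PySem.Set.add p.2 kv.2)
        else (p.1.insert kv.2 kv.1, p.2)) (d, s)).1).get? v =
      match d.get? v with
      | some k => some k
      | none => (l.find? (fun kv => kv.2 == v)).map Prod.fst := by
  induction l generalizing d s with
  | nil => simp; cases d.get? v <;> simp
  | cons kv rest ih =>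
    simp only [List.foldl_cons, List.find?]
    by_cases hc : d.contains kv.2 = true
    · rw [if_pos hc, ih]
      have hsome : (d.get? kv.2).isSome := by rwa [← PySem.Dict.contains_eq_isSome_get?]
      by_cases hv : kv.2 = v
      · subst hv
        cases h : d.get? kv.2 with
        | none => rw [h] at hsome; simp at hsome
        | some k => simp
      · have : (kv.2 == v) = false := by simp [hv]
        rw [this]
    · rw [if_neg hc, ih]
      have hnone : d.get? kv.2 = none := by
        cases h : d.get? kv.2 with
        | none => rfl
        | some k =>
          exfalso; apply hc
          rw [PySem.Dict.contains_eq_isSome_get?, h]; rfl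
      by_cases hv : v = kv.2
      · subst hv
        rw [PySem.Dict.get?_insert_self, hnone]
        simp
      · rw [PySem.Dict.get?_insert_of_ne _ _ hv]
        have : (kv.2 == v) = false := by simp [Ne.symm hv]
        rw [this]

-- characterisation of the fold's duplicate-values component
theorem pvIndexB_snd_mem (l : List (Int × Int)) (d : PySem.Dict Int Int) (s : PySem.Set Int) (v : Int)
    (hs : s.Nodup) :
    (v ∈ (l.foldl (fun p kv =>
        if p.1.contains kv.2 then (p.1, PySem.Set.add p.2 kv.2)
        else (p.1.insert kv.2 kv.1, p.2)) (d, s)).2) ↔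
      v ∈ s ∨ (v ∈ l.map Prod.snd ∧ (d.contains v = true ∨ 2 ≤ (l.map Prod.snd).count v)) := by
  induction l generalizing d s with
  | nil => simp
  | cons kv rest ih =>
    simp only [List.foldl_cons]
    by_cases hv : v = kv.2
    · subst hv
      by_cases hc : d.contains kv.2 = true
      · rw [if_pos hc, ih _ _ (PySem.Set.nodup_add _ _ hs), PySem.Set.mem_add]
        simp only [List.map_cons, List.mem_cons, List.count_cons, hc]
        simp
      · have hc' : d.contains kv.2 = false := by simpa using hc
        rw [if_neg hc, ih _ _ hs]
        have hcontains : ((d.insert kv.2 kv.1).contains kv.2) = true := PySem.Dict.contains_insert_self _ _ _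
        simp only [List.map_cons, List.mem_cons, List.count_cons, hcontains, hc']
        simp
    · have hcount : ((kv.2 :: rest.map Prod.snd).count v) = (rest.map Prod.snd).count v := by
        rw [List.count_cons]
        simp [show ¬ kv.2 = v from fun h => hv h.symm]
      by_cases hc : d.contains kv.2 = true
      · rw [if_pos hc, ih _ _ (PySem.Set.nodup_add _ _ hs), PySem.Set.mem_add]
        simp only [List.map_cons, List.mem_cons, hcount]
        simp [hv]
      · rw [if_neg hc, ih _ _ hs]
        have hne : (d.insert kv.2 kv.1).contains v = d.contains v := by
          rw [PySem.Dict.contains_insert]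
          simp [show (v == kv.2) = false by simp [hv]]
        simp only [List.map_cons, List.mem_cons, hcount, hne]
        simp [hv]

-- two distinct pairs with the same value give value-count at least 2
theorem pv_two_count (l : List (Int × Int)) (p q : Int × Int) (v : Int)
    (hp : p ∈ l) (hq : q ∈ l) (hne : p ≠ q) (hpv : p.2 = v) (hqv : q.2 = v) :
    2 ≤ (l.map Prod.snd).count v := by
  have hperm : l.Perm (p :: l.erase p) := List.perm_cons_erase hp
  have hq' : q ∈ l.erase p := by
    rcases List.mem_cons.mp (hperm.mem_iff.mp hq) with h | h
    · exact absurd h.symm hne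
    · exact h
  have h1 : 0 < (l.erase p).countP (fun kv => kv.2 == v) :=
    List.countP_pos_iff.mpr ⟨q, hq', by simp [hqv]⟩
  have h2 : (l.map Prod.snd).count v = l.countP (fun kv => kv.2 == v) := by
    rw [List.count, List.countP_map]; rfl
  have h3 : l.countP (fun kv => kv.2 == v) = ((p :: l.erase p).countP (fun kv => kv.2 == v)) :=
    hperm.countP_eq _
  rw [h2, h3]
  have h4 : (p :: l.erase p).countP (fun kv => kv.2 == v) =
      (l.erase p).countP (fun kv => kv.2 == v) + 1 := by
    rw [List.countP_cons]; simp [hpv]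
  omega

-- value-count at least 2 plus nodup keys gives a pair with that value whose key avoids ka
theorem pv_count_two_exists (l : List (Int × Int)) (v ka : Int)
    (hn : (l.map Prod.fst).Nodup) (h2 : 2 ≤ (l.map Prod.snd).count v) :
    ∃ pb ∈ l, pb.2 = v ∧ pb.1 ≠ ka := by
  have hdup : [v, v].Sublist (l.map Prod.snd) :=
    List.duplicate_iff_sublist.mp (List.duplicate_iff_two_le_count.mpr h2)
  rcases List.sublist_map_iff.mp hdup with ⟨l', hsub, hmap⟩
  obtain ⟨p, q, rfl⟩ : ∃ p q, l' = [p, q] := by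
    cases l' with
    | nil => simp at hmap
    | cons p t =>
      cases t with
      | nil => simp at hmap
      | cons q t2 =>
        cases t2 with
        | nil => exact ⟨p, q, rfl⟩
        | cons r t3 => simp at hmap
  obtain ⟨hpv', hqv'⟩ : v = p.2 ∧ v = q.2 := by simpa using hmap
  have hpv : p.2 = v := hpv'.symm
  have hqv : q.2 = v := hqv'.symm
  have hkeys : [p.1, q.1].Sublist (l.map Prod.fst) := by
    have := hsub.map Prod.fst
    simpa using this
  have hne : p.1 ≠ q.1 := by
    have := hn.sublist hkeys
    simpa using this
  have hpmem : p ∈ l := hsub.subset (by simp)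
  have hqmem : q ∈ l := hsub.subset (by simp)
  by_cases hka : p.1 = ka
  · exact ⟨q, hqmem, hqv, by rw [← hka]; exact fun h => hne h.symm⟩
  · exact ⟨p, hpmem, hpv, hka⟩

-- with nodup keys in mapB, the inner quadratic scan of A equals B's indexed check
theorem pv_inner_eq (mapB : List (Int × Int)) (hB : (mapB.map Prod.fst).Nodup) (ka va : Int) :
    (mapB.any (fun pb => (va == pb.2 && ka != pb.1) || (ka == pb.1 && va != pb.2))) =
    !((((PySem.Dict.mk mapB).get? ka).all (fun vb => vb == va)) &&
      !(PySem.Set.contains (pvIndexB mapB).2 va) &&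
      (((pvIndexB mapB).1.get? va).all (fun kb => kb == ka))) := by
  have hkeys : (PySem.Dict.mk mapB).keys.Nodup := hB
  have hget : ∀ w, (PySem.Dict.mk mapB).get? ka = some w ↔ (ka, w) ∈ mapB := by
    intro w
    exact PySem.Dict.get?_eq_some_iff_mem_items _ _ _ hkeys
  have hdup : (PySem.Set.contains (pvIndexB mapB).2 va = true) ↔
      (va ∈ mapB.map Prod.snd ∧ 2 ≤ (mapB.map Prod.snd).count va) := by
    rw [PySem.Set.contains_iff]
    unfold pvIndexB
    rw [pvIndexB_snd_mem mapB PySem.Dict.empty PySem.Set.empty va List.nodup_nil]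
    simp [PySem.Dict.contains_empty]
  have hvk : (pvIndexB mapB).1.get? va = (mapB.find? (fun kv => kv.2 == va)).map Prod.fst := by
    unfold pvIndexB
    rw [pvIndexB_fst_get?]
    simp [PySem.Dict.get?_empty]
  rw [Bool.eq_iff_iff]
  constructor
  · -- A found a clash; show B's conjunction is false
    intro hany
    rcases List.any_eq_true.mp hany with ⟨pb, hmem, hbad⟩
    rw [Bool.not_eq_true', Bool.and_eq_false_iff, Bool.and_eq_false_iff]
    rcases Bool.or_eq_true_iff.mp hbad with h | h
    · -- value clash: va = pb.2, ka ≠ pb.1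
      rcases Bool.and_eq_true_iff.mp h with ⟨hv, hk⟩
      have hv : va = pb.2 := by simpa using hv
      have hk : ka ≠ pb.1 := by simpa using hk
      by_cases hdup2 : 2 ≤ (mapB.map Prod.snd).count va
      · left; right
        rw [Bool.not_eq_false']
        exact hdup.mpr ⟨hv ▸ List.mem_map_of_mem hmem, hdup2⟩
      · -- value occurs exactly once, so find? returns pb itself
        right
        rw [hvk]
        cases hf : mapB.find? (fun kv => kv.2 == va) with
        | none =>
          exfalso
          exact (List.find?_eq_none.mp hf) pb hmem (by simp [hv])
        | some q =>
          have hqmem := List.mem_of_find?_eq_some hf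
          have hqval : q.2 = va := by simpa using List.find?_some hf
          have hq : q = pb := by
            by_contra hqp
            exact hdup2 (pv_two_count mapB q pb va hqmem hmem hqp hqval hv.symm)
          simp [Option.all, hq, Ne.symm hk]
    · -- key clash: ka = pb.1, va ≠ pb.2
      rcases Bool.and_eq_true_iff.mp h with ⟨hk, hv⟩
      have hk : ka = pb.1 := by simpa using hk
      have hv : va ≠ pb.2 := by simpa using hv
      left; left
      have : (PySem.Dict.mk mapB).get? ka = some pb.2 := (hget pb.2).mpr (by rw [hk]; simpa using hmem)
      rw [this]
      simp [Option.all, Ne.symm hv]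
  · -- B failed; produce the clashing pair for A
    intro hfail
    rw [Bool.not_eq_true', Bool.and_eq_false_iff, Bool.and_eq_false_iff] at hfail
    apply List.any_eq_true.mpr
    rcases hfail with (hkey | hdupf) | hidx
    · -- first check failed: mapB[ka] exists with a different value
      cases hg : (PySem.Dict.mk mapB).get? ka with
      | none => rw [hg] at hkey; simp [Option.all] at hkey
      | some vb =>
        rw [hg] at hkey
        have hvb : vb ≠ va := by simpa [Option.all] using hkey
        refine ⟨(ka, vb), (hget vb).mp hg, ?_⟩
        simp [Ne.symm hvb]
    · -- duplicate value in mapB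
      rw [Bool.not_eq_false'] at hdupf
      rcases hdup.mp hdupf with ⟨_, h2⟩
      rcases pv_count_two_exists mapB va ka hB h2 with ⟨pb, hmem, hv, hk⟩
      exact ⟨pb, hmem, by simp [hv]; omega⟩
    · -- value→key index points at a different key
      rw [hvk] at hidx
      cases hf : mapB.find? (fun kv => kv.2 == va) with
      | none => rw [hf] at hidx; simp [Option.all] at hidx
      | some q =>
        rw [hf] at hidx
        have hk : q.1 ≠ ka := by simpa [Option.all] using hidx
        have hqval : q.2 = va := by simpa using List.find?_some hf
        exact ⟨q, List.mem_of_find?_eq_some hf, by simp [hqval, Ne.symm hk]⟩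

-- every index access the two ports share is defined on a nonempty list
theorem pv_gets_some (xs : List Int) (hxs : xs ≠ []) :
    ∃ a b, PySem.List.pyGet? xs 0 = some a ∧ PySem.List.pyGet? xs (-1) = some b := by
  rw [PySem.List.pyGet?_zero, PySem.List.pyGet?_neg_one]
  cases xs with
  | nil => exact absurd rfl hxs
  | cons x t =>
    exact ⟨x, (x :: t).getLast (by simp), by simp, List.getLast?_eq_some_getLast (by simp)⟩

-- ===== VERDICT (by name: the statement is the Claim_ definition above) =====
theorem is_mapping_compatible_spec : Claim_equal_is_mapping_compatible := by
  unfold Claim_equal_is_mapping_compatible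
  intro mapA mapB pathAIds stringA stringB _hDom hPre
  obtain ⟨hpath, hA, hB, hnA, hnB⟩ := hPre
  unfold Spec_is_mapping_compatible is_mapping_compatible is_mapping_compatible_alt
  obtain ⟨s0, sL, hs0, hsL⟩ := pv_gets_some pathAIds hpath
  obtain ⟨a0, aL, ha0, haL⟩ := pv_gets_some (mapA.map Prod.fst) (by simpa using hA)
  obtain ⟨b0, bL, hb0, hbL⟩ := pv_gets_some (mapB.map Prod.fst) (by simpa using hB)
  simp only [hs0, hsL, ha0, haL, hb0, hbL, Option.elim_some]
  have hg : ∀ x y : Bool, (if y then true else (if x then true else false)) = (x || y) := by decide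
  rw [hg]
  have hlenA : PySem.Set.len (PySem.Set.ofList (mapA.map Prod.fst)) = (mapA.length : Int) := by
    rw [PySem.Set.ofList_eq_self_of_nodup _ hnA]
    simp [PySem.Set.len]
  have hlenB : PySem.Set.len (PySem.Set.ofList (mapB.map Prod.fst)) = (mapB.length : Int) := by
    rw [PySem.Set.ofList_eq_self_of_nodup _ hnB]
    simp [PySem.Set.len]
  rw [hlenA, hlenB]
  have hloop : (mapA.any (fun pa => mapB.any (fun pb =>
        (pa.2 == pb.2 && pa.1 != pb.1) || (pa.1 == pb.1 && pa.2 != pb.2)))) =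
      !(mapA.all (fun kv =>
        (((PySem.Dict.mk mapB).get? kv.1).all (fun vb => vb == kv.2)) &&
        !(PySem.Set.contains (pvIndexB mapB).2 kv.2) &&
        (((pvIndexB mapB).1.get? kv.2).all (fun kb => kb == kv.1)))) := by
    have h1 : (fun pa : Int × Int => mapB.any (fun pb =>
        (pa.2 == pb.2 && pa.1 != pb.1) || (pa.1 == pb.1 && pa.2 != pb.2))) =
        (fun pa : Int × Int => !((((PySem.Dict.mk mapB).get? pa.1).all (fun vb => vb == pa.2)) &&
        !(PySem.Set.contains (pvIndexB mapB).2 pa.2) &&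
        (((pvIndexB mapB).1.get? pa.2).all (fun kb => kb == pa.1)))) := funext fun pa => pv_inner_eq mapB hnB pa.1 pa.2
    rw [h1, List.all_eq_not_any_not]
    simp
  rw [hloop]
  have hfin : ∀ x : Bool, (if (!x) = true then false else true) = x := by decide
  rw [hfin]
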